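-- pv_equiv track=rewrite | github.com/womogenes/re-zero | hardware/webcam/mx_brio_morse.py | morse_to_timeline
-- ===== SOURCE A (Python) =====
-- def morse_to_timeline(morse_str, unit_s, dash_weight=3):
--     """Convert Morse string to list of (on: bool, duration_s) tuples.
--     dash_weight: dash = dash_weight * unit_s (ITU standard = 3, use 5+ for demos).
--     """
--     timeline = []
--     i = 0
--     while i < len(morse_str):
--         ch = morse_str[i]
--         if ch == '.':
--             timeline.append((True, unit_s))          # dot ON
--             # intra-char gap (if next is dot or dash)
--             if i + 1 < len(morse_str) and morse_str[i + 1] in '.-':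
--                 timeline.append((False, unit_s))
--         elif ch == '-':
--             timeline.append((True, dash_weight * unit_s))  # dash ON
--             if i + 1 < len(morse_str) and morse_str[i + 1] in '.-':
--                 timeline.append((False, unit_s))
--         elif ch == '/':
--             if i + 1 < len(morse_str) and morse_str[i + 1] == '/':
--                 timeline.append((False, 7 * unit_s))  # word gap
--                 i += 1  # skip second /
--             else:
--                 timeline.append((False, 3 * unit_s))  # letter gap
--         i += 1
--     return timeline
-- ===== SOURCE B (Python) =====
-- def morse_to_timeline(morse_str, unit_s, dash_weight=3):
--     """Convert Morse string to list of (on: bool, duration_s) tuples.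
--
--     Build-then-emit: tokenize (each run of '/' one token, every other char its
--     own token), then emit durations with token lookahead.
--     """
--     tokens = []
--     i = 0
--     n = len(morse_str)
--     while i < n:
--         if morse_str[i] == '/':
--             j = i + 1
--             while j < n and morse_str[j] == '/':
--                 j += 1
--             tokens.append(morse_str[i:j])
--             i = j
--         else:
--             tokens.append(morse_str[i])
--             i += 1
--     timeline = []
--     for k, tok in enumerate(tokens):
--         nxt = tokens[k + 1] if k + 1 < len(tokens) else None
--         if tok == '.' or tok == '-':
--             timeline.append((True, unit_s if tok == '.' else dash_weight * unit_s))
--             if nxt == '.' or nxt == '-':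
--                 timeline.append((False, unit_s))
--         elif tok[0] == '/':
--             m = len(tok)
--             timeline.extend([(False, 7 * unit_s)] * (m // 2))
--             if m % 2:
--                 timeline.append((False, 3 * unit_s))
--     return timeline
-- ===== Notes on version B (the rewrite author's own statement) =====
-- stated objective: alternative
-- what changed: Replaces A's single index-with-lookahead while loop by a two-phase build-then-emit design: first tokenize the string (each run of '/' becomes one token, every other character its own token), then a second pass emits ON tuples with intra-char gaps decided by token lookahead and turns each slash run of length n into n//2 word gaps plus an odd-leftover letter gap.
import Mathlib
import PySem

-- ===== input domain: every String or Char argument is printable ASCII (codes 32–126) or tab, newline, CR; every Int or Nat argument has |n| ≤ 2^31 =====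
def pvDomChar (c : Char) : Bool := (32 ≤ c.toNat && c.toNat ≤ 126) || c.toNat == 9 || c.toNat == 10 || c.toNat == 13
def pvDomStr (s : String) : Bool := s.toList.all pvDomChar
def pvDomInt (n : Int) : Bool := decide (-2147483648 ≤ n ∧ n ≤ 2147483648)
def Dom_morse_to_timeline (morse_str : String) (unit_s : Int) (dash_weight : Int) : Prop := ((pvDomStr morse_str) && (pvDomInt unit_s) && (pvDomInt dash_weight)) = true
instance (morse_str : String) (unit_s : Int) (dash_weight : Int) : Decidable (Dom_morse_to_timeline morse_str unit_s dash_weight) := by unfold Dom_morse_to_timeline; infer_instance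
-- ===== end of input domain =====

-- B tokenizes the string into tokens (slash runs grouped, each other char its own token)
-- and then emits the timeline in a second pass, instead of A's index loop with lookahead;
-- objective: alternative decomposition, same cost.

-- ===== PORT A =====
-- A's intra-char gap lookahead: `morse_str[i+1] in '.-'`
def pvGapA (u : Int) (rest : List Char) : List (Bool × Int) :=
  match rest with
  | n :: _ => if n = '.' ∨ n = '-' then [(false, u)] else []
  | [] => []

-- A's while loop over indices, as recursion on the remaining characters
-- (the '//' pair-skip `i += 1; i += 1` is the two-char pattern)
def pvGoA (u d : Int) : List Char → List (Bool × Int)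
  | [] => []
  | '.' :: rest => (true, u) :: (pvGapA u rest ++ pvGoA u d rest)
  | '-' :: rest => (true, d * u) :: (pvGapA u rest ++ pvGoA u d rest)
  | '/' :: '/' :: rest2 => (false, 7 * u) :: pvGoA u d rest2
  | '/' :: rest => (false, 3 * u) :: pvGoA u d rest
  | _ :: rest => pvGoA u d rest

def morse_to_timeline (morse_str : String) (unit_s : Int) (dash_weight : Int) : List (Bool × Int) :=
  pvGoA unit_s dash_weight morse_str.toList

-- ===== PORT B =====
-- B's tokenizer: each run of '/' is one token, every other char is its own token
def pvTokens : List Char → List (List Char)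
  | [] => []
  | c :: rest =>
    if c = '/' then
      ('/' :: rest.takeWhile (· = '/')) :: pvTokens (rest.dropWhile (· = '/'))
    else [c] :: pvTokens rest
termination_by cs => cs.length
decreasing_by
  · have := List.length_dropWhile_le (fun x => decide (x = '/')) rest
    simp; omega
  · simp

-- B's emit pass with next-token lookahead
def pvEmit (u d : Int) : List (List Char) → List (Bool × Int)
  | [] => []
  | tok :: rest =>
    let gap := if rest.head? = some ['.'] ∨ rest.head? = some ['-'] then [(false, u)] else []
    if tok = ['.'] then (true, u) :: (gap ++ pvEmit u d rest)
    else if tok = ['-'] then (true, d * u) :: (gap ++ pvEmit u d rest)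
    else if tok.head? = some '/' then
      List.replicate (tok.length / 2) (false, 7 * u) ++
        (if tok.length % 2 = 1 then [(false, 3 * u)] else []) ++ pvEmit u d rest
    else pvEmit u d rest

def morse_to_timeline_alt (morse_str : String) (unit_s : Int) (dash_weight : Int) : List (Bool × Int) :=
  pvEmit unit_s dash_weight (pvTokens morse_str.toList)

-- ===== PRECONDITION & SPEC =====
def Spec_morse_to_timeline (morse_str : String) (unit_s : Int) (dash_weight : Int) (out : List (Bool × Int)) : Prop := out = morse_to_timeline_alt morse_str unit_s dash_weight
instance (morse_str : String) (unit_s : Int) (dash_weight : Int) (out : List (Bool × Int)) : Decidable (Spec_morse_to_timeline morse_str unit_s dash_weight out) := by unfold Spec_morse_to_timeline; infer_instance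

-- ===== CLAIM (what is proved, stated in full; the proofs are below) =====
def Claim_equal_morse_to_timeline : Prop := ∀ (morse_str : String) (unit_s : Int) (dash_weight : Int), Dom_morse_to_timeline morse_str unit_s dash_weight → Spec_morse_to_timeline morse_str unit_s dash_weight (morse_to_timeline morse_str unit_s dash_weight)

-- ===== LEMMAS AND PROOFS =====

-- the first token determines A's lookahead: gap iff the head token is "." or "-"
theorem pvGap_tokens (u : Int) (cs : List Char) :
    pvGapA u cs =
      (if (pvTokens cs).head? = some ['.'] ∨ (pvTokens cs).head? = some ['-'] then [(false, u)] else []) := by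
  cases cs with
  | nil => simp [pvGapA, pvTokens]
  | cons c r =>
    by_cases hc : c = '/'
    · subst hc; simp [pvGapA, pvTokens]
    · simp [pvGapA, pvTokens, hc]

-- A consumes a slash run pairwise: n//2 word gaps then one letter gap if n is odd
theorem pvRun (u d : Int) : ∀ (k : ℕ) (rest : List Char), rest.head? ≠ some '/' →
    pvGoA u d (List.replicate k '/' ++ rest) =
      List.replicate (k / 2) (false, 7 * u) ++
        (if k % 2 = 1 then [(false, 3 * u)] else []) ++ pvGoA u d rest := by
  intro k
  induction k using Nat.strong_induction_on with
  | _ k ih =>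
    match k with
    | 0 => intro rest _; simp
    | 1 =>
      intro rest h
      cases rest with
      | nil => simp [pvGoA]
      | cons x xs =>
        have hx : x ≠ '/' := by simpa using h
        simp [pvGoA, hx]
    | (m + 2) =>
      intro rest h
      have h1 : pvGoA u d (List.replicate (m + 2) '/' ++ rest)
          = (false, 7 * u) :: pvGoA u d (List.replicate m '/' ++ rest) := by
        simp [List.replicate, pvGoA]
      rw [h1, ih m (by omega) rest h]
      have h2 : (m + 2) / 2 = m / 2 + 1 := by omega
      have h3 : (m + 2) % 2 = m % 2 := by omega
      rw [h2, h3, List.replicate_succ]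
      simp

-- the first element surviving dropWhile fails the predicate
theorem pvHeadDropWhile (p : Char → Bool) : ∀ (l : List Char) (y : Char),
    (l.dropWhile p).head? = some y → p y = false := by
  intro l
  induction l with
  | nil => simp
  | cons x xs ihl =>
    intro y hy
    by_cases hp : p x
    · rw [List.dropWhile_cons_of_pos hp] at hy
      exact ihl y hy
    · rw [List.dropWhile_cons_of_neg hp] at hy
      simp at hy
      subst hy
      simpa using hp

theorem pvMain (u d : Int) : ∀ (cs : List Char), pvGoA u d cs = pvEmit u d (pvTokens cs) := by
  have H : ∀ (n : ℕ) (cs : List Char), cs.length ≤ n → pvGoA u d cs = pvEmit u d (pvTokens cs) := by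
    intro n
    induction n with
    | zero =>
      intro cs h
      have : cs = [] := by cases cs <;> simp_all
      subst this; simp [pvGoA, pvTokens, pvEmit]
    | succ n ih =>
      intro cs h
      cases cs with
      | nil => simp [pvGoA, pvTokens, pvEmit]
      | cons c rest =>
        have hrest : rest.length ≤ n := by simp at h; omega
        by_cases hdot : c = '.'
        · subst hdot
          rw [show pvTokens ('.' :: rest) = ['.'] :: pvTokens rest from by simp [pvTokens]]
          simp only [pvGoA, pvEmit]
          rw [pvGap_tokens u rest, ih rest hrest]
          simp
        · by_cases hdash : c = '-'
          · subst hdash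
            rw [show pvTokens ('-' :: rest) = ['-'] :: pvTokens rest from by simp [pvTokens]]
            simp only [pvGoA, pvEmit]
            rw [pvGap_tokens u rest, ih rest hrest]
            simp
          · by_cases hsl : c = '/'
            · subst hsl
              have hsplit : rest = rest.takeWhile (· = '/') ++ rest.dropWhile (· = '/') :=
                (List.takeWhile_append_dropWhile).symm
              set run := rest.takeWhile (· = '/') with hrun
              set rest' := rest.dropWhile (· = '/') with hrest'
              have hrep : run = List.replicate run.length '/' := by
                apply List.eq_replicate_of_mem
                intro x hx
                have := List.mem_takeWhile_imp hx
                simpa using this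
              have hhd : rest'.head? ≠ some '/' := by
                intro hcontra
                have := pvHeadDropWhile (fun x => decide (x = '/')) rest '/' (by rw [← hrest']; exact hcontra)
                simp at this
              have hfull : '/' :: rest = List.replicate (run.length + 1) '/' ++ rest' := by
                rw [List.replicate_succ]
                simpa [← hrep] using congrArg (fun l => '/' :: l) hsplit
              have hAside : pvGoA u d ('/' :: rest) =
                  List.replicate ((run.length + 1) / 2) (false, 7 * u) ++
                    (if (run.length + 1) % 2 = 1 then [(false, 3 * u)] else []) ++ pvGoA u d rest' := by
                rw [hfull]; exact pvRun u d (run.length + 1) rest' hhd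
              rw [hAside]
              rw [show pvTokens ('/' :: rest) = ('/' :: run) :: pvTokens rest' from by
                simp [pvTokens, hrun, hrest']]
              have hne1 : ('/' :: run) ≠ ['.'] := by intro hc; simp at hc
              have hne2 : ('/' :: run) ≠ ['-'] := by intro hc; simp at hc
              have hlen : rest'.length ≤ n := by
                have := List.length_dropWhile_le (fun x => decide (x = '/')) rest
                rw [← hrest'] at this; omega
              simp only [pvEmit, if_neg hne1, if_neg hne2, List.head?_cons]
              rw [ih rest' hlen]
              simp
            · rw [show pvTokens (c :: rest) = [c] :: pvTokens rest from by simp [pvTokens, hsl]]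
              have hA : pvGoA u d (c :: rest) = pvGoA u d rest := by
                simp [pvGoA, hsl]
              have hne1 : [c] ≠ ['.'] := by simpa using hdot
              have hne2 : [c] ≠ ['-'] := by simpa using hdash
              have hne3 : ([c] : List Char).head? ≠ some '/' := by simpa using hsl
              rw [hA, ih rest hrest]
              simp only [pvEmit, if_neg hne1, if_neg hne2, if_neg hne3]
  intro cs; exact H cs.length cs le_rfl

-- ===== VERDICT (by name: the statement is the Claim_ definition above) =====
theorem morse_to_timeline_spec : Claim_equal_morse_to_timeline := by
  intro s u d _
  unfold Spec_morse_to_timeline morse_to_timeline morse_to_timeline_alt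
  exact pvMain u d s.toList
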